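-- pv_equiv track=rewrite | github.com/DataDog/system-tests | utils/scripts/activate_easy_wins/_internal/core.py | tup_to_rule
-- ===== SOURCE A (Python) =====
-- def tup_to_rule(tup: tuple[str, ...]) -> str:
--     rule = tup[0]
--     sep = "/"
--     for element in tup[1:]:
--         rule += f"{sep}{element}"
--         if element.endswith(".py"):
--             sep = "::"
--     return rule
-- ===== SOURCE B (Python) =====
-- def tup_to_rule(tup: tuple[str, ...]) -> str:
--     head = tup[0]
--     rest = list(tup[1:])
--     for i, e in enumerate(rest):
--         if e.endswith(".py"):
--             return "::".join(["/".join([head] + rest[:i + 1])] + rest[i + 1:])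
--     return "/".join([head] + rest)
-- ===== Notes on version B (the rewrite author's own statement) =====
-- stated objective: simpler
-- what changed: B replaces A's character-accumulating loop with a mutating separator by locating the first '.py' element after index 0 and building the result with two joins ('/' up to and including it, '::' after it).
import Mathlib
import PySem

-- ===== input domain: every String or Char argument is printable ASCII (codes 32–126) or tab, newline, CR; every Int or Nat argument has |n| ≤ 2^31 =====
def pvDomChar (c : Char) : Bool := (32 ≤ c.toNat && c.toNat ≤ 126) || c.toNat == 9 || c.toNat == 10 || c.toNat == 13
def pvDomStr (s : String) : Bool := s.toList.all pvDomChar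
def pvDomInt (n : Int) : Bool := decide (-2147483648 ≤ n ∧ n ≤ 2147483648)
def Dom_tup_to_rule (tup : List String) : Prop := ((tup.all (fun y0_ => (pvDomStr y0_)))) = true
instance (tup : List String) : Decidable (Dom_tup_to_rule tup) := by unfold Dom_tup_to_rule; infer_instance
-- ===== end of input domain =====

-- ===== PORT A =====
-- B differs from A only in structure (one-sentence objective): B finds the first
-- '.py' element after index 0 and builds the result with two joins instead of
-- A's element loop with a mutating separator.
-- A-side loop: 'for element in tup[1:]' with state (rule, sep)
def tupToRuleLoopA (rule sep : String) : List String → String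
  | [] => rule
  | e :: rest =>
      tupToRuleLoopA (rule ++ sep ++ e)
        (if PySem.Str.endswith e ".py" then "::" else sep) rest

def tup_to_rule (tup : List String) : String :=
  match PySem.List.pyGet? tup 0 with
  | none => ""      -- tup[0] raises IndexError; excluded by Pre_
  | some h => tupToRuleLoopA h "/" (PySem.List.slice tup (some 1) none)

-- ===== PORT B =====
-- B-side scan: enumerate(rest) looking for the first e ending in ".py";
-- pre is rest[:i] (the elements already passed over)
def tupToRuleScanB (head : String) (pre : List String) : List String → String
  | [] => PySem.Str.join "/" (head :: pre)
  | e :: rest =>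
      if PySem.Str.endswith e ".py" then
        PySem.Str.join "::" (PySem.Str.join "/" (head :: (pre ++ [e])) :: rest)
      else tupToRuleScanB head (pre ++ [e]) rest

def tup_to_rule_alt (tup : List String) : String :=
  match PySem.List.pyGet? tup 0 with
  | none => ""      -- tup[0] raises IndexError; excluded by Pre_
  | some h => tupToRuleScanB h [] (PySem.List.slice tup (some 1) none)

-- ===== PRECONDITION & SPEC =====
-- Pre_ excludes only the empty tuple, on which A raises IndexError at tup[0].
def Pre_tup_to_rule (tup : List String) : Prop := tup ≠ []
instance (tup : List String) : Decidable (Pre_tup_to_rule tup) := by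
  unfold Pre_tup_to_rule; infer_instance
def pvWitness_tup_to_rule : List String := ["tests", "apm", "test_span.py", "Test_X", "test_main"]

def Spec_tup_to_rule (tup : List String) (out : String) : Prop := out = tup_to_rule_alt tup
instance (tup : List String) (out : String) : Decidable (Spec_tup_to_rule tup out) := by
  unfold Spec_tup_to_rule; infer_instance

-- ===== CLAIM (what is proved, stated in full; the proofs are below) =====
def Claim_equal_tup_to_rule : Prop := ∀ (tup : List String), Dom_tup_to_rule tup → Pre_tup_to_rule tup → Spec_tup_to_rule tup (tup_to_rule tup)

-- ===== LEMMAS AND PROOFS =====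

-- join sep ((a ++ sep ++ b) :: rest) = a ++ sep ++ join sep (b :: rest), at the Chars level
theorem chars_join_head_append (sep a b : List Char) (rest : List (List Char)) :
    PySem.Chars.join sep ((a ++ sep ++ b) :: rest)
      = a ++ sep ++ PySem.Chars.join sep (b :: rest) := by
  cases rest with
  | nil => simp [PySem.Chars.join_singleton]
  | cons q r =>
      rw [PySem.Chars.join_cons_cons, PySem.Chars.join_cons_cons]
      simp [List.append_assoc]

-- appending one more part to a nonempty '/'-join, at the Chars level
theorem chars_join_snoc (sep e h : List Char) (acc : List (List Char)) :
    PySem.Chars.join sep (h :: acc) ++ sep ++ e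
      = PySem.Chars.join sep (h :: (acc ++ [e])) := by
  induction acc generalizing h with
  | nil => simp [PySem.Chars.join_singleton, PySem.Chars.join_cons_cons]
  | cons a as ih =>
      rw [PySem.Chars.join_cons_cons, List.cons_append, PySem.Chars.join_cons_cons, ← ih a]
      simp [List.append_assoc]

-- the String-level versions
theorem str_join_snoc (sep e h : String) (acc : List String) :
    PySem.Str.join sep (h :: acc) ++ sep ++ e
      = PySem.Str.join sep (h :: (acc ++ [e])) := by
  apply String.toList_injective
  simp [String.toList_append, PySem.Str.toList_join]
  simpa [List.append_assoc] using
    chars_join_snoc sep.toList e.toList h.toList (acc.map String.toList)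

theorem str_join_head_append (sep a b : String) (rest : List String) :
    PySem.Str.join sep ((a ++ sep ++ b) :: rest)
      = a ++ sep ++ PySem.Str.join sep (b :: rest) := by
  apply String.toList_injective
  simp [String.toList_append, PySem.Str.toList_join]
  simpa [List.append_assoc] using
    chars_join_head_append sep.toList a.toList b.toList (rest.map String.toList)

theorem str_join_cons_cons (sep p q : String) (rest : List String) :
    PySem.Str.join sep (p :: q :: rest) = p ++ sep ++ PySem.Str.join sep (q :: rest) := by
  apply String.toList_injective
  simpa [String.toList_append, PySem.Str.toList_join, List.append_assoc] using
    PySem.Chars.join_cons_cons sep.toList p.toList q.toList (rest.map String.toList)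

theorem str_join_singleton (sep h : String) : PySem.Str.join sep [h] = h := by
  apply String.toList_injective
  simp [PySem.Str.toList_join, PySem.Chars.join_singleton]

-- once sep is "::" it stays "::": A's loop is a '::'-join from there on
theorem loopA_sep2 (rule : String) (rest : List String) :
    tupToRuleLoopA rule "::" rest = PySem.Str.join "::" (rule :: rest) := by
  induction rest generalizing rule with
  | nil => simp [tupToRuleLoopA, str_join_singleton]
  | cons e r ih =>
      simp only [tupToRuleLoopA, ite_self]
      rw [ih, str_join_head_append, ← str_join_cons_cons]

-- main invariant: while sep is still "/", rule is the '/'-join of head :: pre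
theorem loop_eq (h : String) (acc rest : List String) :
    tupToRuleLoopA (PySem.Str.join "/" (h :: acc)) "/" rest
      = tupToRuleScanB h acc rest := by
  induction rest generalizing acc with
  | nil => simp [tupToRuleLoopA, tupToRuleScanB]
  | cons e r ih =>
      simp only [tupToRuleLoopA, tupToRuleScanB]
      by_cases hp : PySem.Str.endswith e ".py" = true
      · simp only [hp, if_true]
        rw [str_join_snoc, loopA_sep2]
      · simp only [hp, if_false, Bool.false_eq_true]
        rw [str_join_snoc, ih]

-- ===== VERDICT (by name: the statement is the Claim_ definition above) =====
theorem tup_to_rule_spec : Claim_equal_tup_to_rule := by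
  intro tup _ hpre
  unfold Spec_tup_to_rule tup_to_rule tup_to_rule_alt
  cases tup with
  | nil => exact absurd rfl hpre
  | cons h t =>
      have hg : PySem.List.pyGet? (h :: t) (0 : Int) = some h := by
        simp
      rw [hg]
      simp only [PySem.List.slice_from_one, List.tail_cons]
      have := loop_eq h [] t
      rwa [str_join_singleton] at this
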